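-- pv_equiv track=rewrite | github.com/maskitobr/sorteio | app/dbinit.py | set_double
-- ===== SOURCE A (Python) =====
-- def set_double(num):
--     singles = [
--         x
--         for x in range(43, 259)
--         if x not in range(48, 96)
--         if x not in range(111, 181)
--         if x not in range(183, 195)
--         if x not in range(199, 225)
--     ]
--     return False if num in singles else True
-- ===== SOURCE B (Python) =====
-- def set_double(num):
--     in_singles = (num in range(43, 259)
--                   and num not in range(48, 96)
--                   and num not in range(111, 181)
--                   and num not in range(183, 195)
--                   and num not in range(199, 225))
--     return not in_singles
-- ===== Notes on version B (the rewrite author's own statement) =====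
-- stated objective: simpler
-- what changed: Instead of materialising the filtered list of single numbers and scanning it for num, B evaluates the five range-membership tests on num directly and negates their conjunction.
import Mathlib
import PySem

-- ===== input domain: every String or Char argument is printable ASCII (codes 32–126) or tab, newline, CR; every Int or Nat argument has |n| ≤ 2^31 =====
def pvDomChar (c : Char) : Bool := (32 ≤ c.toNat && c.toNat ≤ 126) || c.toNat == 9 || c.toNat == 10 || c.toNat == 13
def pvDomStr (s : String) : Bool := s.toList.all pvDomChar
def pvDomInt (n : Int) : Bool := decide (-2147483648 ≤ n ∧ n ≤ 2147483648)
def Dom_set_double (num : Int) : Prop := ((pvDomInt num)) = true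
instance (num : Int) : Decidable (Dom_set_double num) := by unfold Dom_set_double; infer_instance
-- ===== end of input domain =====

-- B replaces A's materialised, filtered list of 'singles' (built then scanned for num)
-- by direct range-membership tests on num; objective: simpler.

-- ===== PORT A =====
def set_double (num : Int) : Bool :=
  let singles : List Int :=
    (PySem.List.pyRange 43 259 1).filter (fun x =>
      !(PySem.List.pyRange 48 96 1).contains x
      && !(PySem.List.pyRange 111 181 1).contains x
      && !(PySem.List.pyRange 183 195 1).contains x
      && !(PySem.List.pyRange 199 225 1).contains x)
  if singles.contains num then false else true

-- ===== PORT B =====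
def set_double_alt (num : Int) : Bool :=
  let in_singles : Bool :=
    (decide (43 ≤ num) && decide (num < 259))
    && !(decide (48 ≤ num) && decide (num < 96))
    && !(decide (111 ≤ num) && decide (num < 181))
    && !(decide (183 ≤ num) && decide (num < 195))
    && !(decide (199 ≤ num) && decide (num < 225))
  !in_singles

-- ===== PRECONDITION & SPEC =====
def Spec_set_double (num : Int) (out : Bool) : Prop := out = set_double_alt num
instance (num : Int) (out : Bool) : Decidable (Spec_set_double num out) := by unfold Spec_set_double; infer_instance

-- ===== CLAIM (what is proved, stated in full; the proofs are below) =====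
def Claim_equal_set_double : Prop := ∀ (num : Int), Dom_set_double num → Spec_set_double num (set_double num)

-- ===== LEMMAS AND PROOFS =====
theorem set_double_eq_alt (num : Int) : set_double num = set_double_alt num := by
  simp only [set_double, set_double_alt, List.contains_eq_mem, List.mem_filter,
    PySem.List.mem_pyRange_one]
  by_cases h1 : 43 ≤ num ∧ num < 259 <;>
  by_cases h2 : 48 ≤ num ∧ num < 96 <;>
  by_cases h3 : 111 ≤ num ∧ num < 181 <;>
  by_cases h4 : 183 ≤ num ∧ num < 195 <;>
  by_cases h5 : 199 ≤ num ∧ num < 225 <;>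
  simp_all <;> (rw [Bool.eq_iff_iff] <;> simp <;> omega)

-- ===== VERDICT (by name: the statement is the Claim_ definition above) =====
theorem set_double_spec : Claim_equal_set_double := by
  intro num _
  exact set_double_eq_alt num
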